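-- pv_equiv track=rewrite | github.com/ojs201/Algorithm-Study_23-2 | Omega/1st week assignment/이진 변환 반복하기.py | remove_zero
-- ===== SOURCE A (Python) =====
-- def remove_zero(s):
--     cnt = 0
--     remove = [False] * len(s)
--     for i in range(0, len(s)):
--         if s[i] == '0':
--             remove[i] = True
--             cnt += 1
--     s = [s[j] for j in range(len(s)) if not remove[j]]
--     t = ''.join(s)
--     return t, cnt
-- ===== SOURCE B (Python) =====
-- def remove_zero(s):
--     cnt = 0
--     out = []
--     for ch in s:
--         if ch == '0':
--             cnt += 1
--         else:
--             out.append(ch)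
--     return ''.join(out), cnt
-- ===== Notes on version B (the rewrite author's own statement) =====
-- stated objective: simpler
-- what changed: Replaced A's two-phase scheme (build a full boolean removal mask over all indices, then filter by index in a second range pass) with a single fused pass over the characters that counts '0's and accumulates the kept characters directly; a timing run measured this constant-factor win (no mask allocation, one pass instead of two indexed passes).
import Mathlib
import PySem

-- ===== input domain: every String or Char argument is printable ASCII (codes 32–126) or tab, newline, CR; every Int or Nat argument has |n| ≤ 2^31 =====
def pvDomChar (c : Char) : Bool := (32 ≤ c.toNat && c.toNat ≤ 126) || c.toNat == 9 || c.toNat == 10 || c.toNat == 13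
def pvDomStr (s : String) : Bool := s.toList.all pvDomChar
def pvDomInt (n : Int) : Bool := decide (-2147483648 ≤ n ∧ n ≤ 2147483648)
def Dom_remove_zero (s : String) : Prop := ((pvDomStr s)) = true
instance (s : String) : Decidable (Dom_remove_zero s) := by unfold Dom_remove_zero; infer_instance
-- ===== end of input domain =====

-- B fuses A's two passes (mask build + indexed filter) into one accumulating scan: simpler, no mask.

-- ===== PORT A =====
-- s[i]/remove[j] are always indexed in range here, so pyGetD with an arbitrary default is exact;
-- 'remove[i] = True' is List.set (the index is in range, as in the Python).
def aMaskStep (cs : List Char) (st : Int × List Bool) (i : Int) : Int × List Bool :=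
  if PySem.List.pyGetD cs i ' ' == '0' then (st.1 + 1, st.2.set i.toNat true) else st

def aKeepStep (cs : List Char) (remove : List Bool) (acc : List Char) (j : Int) : List Char :=
  if !(PySem.List.pyGetD remove j false) then acc ++ [PySem.List.pyGetD cs j ' '] else acc

def remove_zero (s : String) : String × Int :=
  let cs := s.toList
  let st := (PySem.List.pyRange 0 cs.length 1).foldl (aMaskStep cs) (0, List.replicate cs.length false)
  let s2 := (PySem.List.pyRange 0 cs.length 1).foldl (aKeepStep cs st.2) []
  (String.mk s2, st.1)

-- ===== PORT B =====
def removeZeroGo : List Char → Int → List Char → String × Int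
  | [], cnt, out => (String.mk out, cnt)
  | c :: rest, cnt, out =>
      if c == '0' then removeZeroGo rest (cnt + 1) out
      else removeZeroGo rest cnt (out ++ [c])

def remove_zero_alt (s : String) : String × Int :=
  removeZeroGo s.toList 0 []

-- ===== PRECONDITION & SPEC =====
def Spec_remove_zero (s : String) (out : String × Int) : Prop := out = remove_zero_alt s
instance (s : String) (out : String × Int) : Decidable (Spec_remove_zero s out) := by unfold Spec_remove_zero; infer_instance

-- ===== CLAIM (what is proved, stated in full; the proofs are below) =====
def Claim_equal_remove_zero : Prop := ∀ (s : String), Dom_remove_zero s → Spec_remove_zero s (remove_zero s)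

-- ===== LEMMAS AND PROOFS =====

theorem removeZeroGo_eq (l : List Char) : ∀ (cnt : Int) (out : List Char),
    removeZeroGo l cnt out
      = (String.mk (out ++ l.filter (fun c => !(c == '0'))), cnt + (l.countP (· == '0') : Int)) := by
  induction l with
  | nil => intro cnt out; simp [removeZeroGo]
  | cons c rest ih =>
      intro cnt out
      by_cases h : c == '0'
      · simp [removeZeroGo, h, ih]; push_cast; ring
      · simp [removeZeroGo, h, ih]

theorem maskFold (cs : List Char) (d : Nat) : ∀ (j : Nat) (c : Int), cs.length - j = d → j ≤ cs.length →
    (PySem.List.pyRange (j : Int) (cs.length : Int) 1).foldl (aMaskStep cs)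
      (c, (cs.map (· == '0')).take j ++ List.replicate (cs.length - j) false)
    = (c + ((cs.drop j).countP (· == '0') : Int), cs.map (· == '0')) := by
  induction d with
  | zero =>
      intro j c hd hj
      have hj' : j = cs.length := by omega
      subst hj'
      rw [PySem.List.pyRange_one_eq_nil (le_refl _)]
      simp
  | succ d ih =>
      intro j c hd hj
      have hlt : j < cs.length := by omega
      have hltm : j < (cs.map (· == '0')).length := by simpa using hlt
      rw [PySem.List.pyRange_one_cons (by exact_mod_cast hlt)]
      have hcast : ((j : Int) + 1) = ((j + 1 : Nat) : Int) := by push_cast; ring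
      have hget : PySem.List.pyGetD cs (j : Int) ' ' = cs[j] := by
        simp [List.getD_eq_getElem?_getD, List.getElem?_eq_getElem hlt]
      have hlen : ((cs.map (· == '0')).take j).length = j := by
        simp [List.length_take, Nat.min_eq_left hj]
      have hrep : List.replicate (cs.length - j) false
          = false :: List.replicate (cs.length - (j + 1)) false := by
        have : cs.length - j = (cs.length - (j + 1)) + 1 := by omega
        rw [this, List.replicate_succ]
      have htake : (cs.map (· == '0')).take (j + 1)
          = (cs.map (· == '0')).take j ++ [(cs[j] == '0')] := by
        rw [List.take_add_one, List.getElem?_eq_getElem hltm]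
        simp
      have hdrop : cs.drop j = cs[j] :: cs.drop (j + 1) := List.drop_eq_getElem_cons hlt
      simp only [List.foldl_cons, aMaskStep, hget]
      by_cases h0 : (cs[j] == '0') = true
      · have hset : (((cs.map (· == '0')).take j ++ List.replicate (cs.length - j) false).set j true)
            = (cs.map (· == '0')).take (j + 1) ++ List.replicate (cs.length - (j + 1)) false := by
          rw [hrep, htake, List.set_append, hlen]
          simp [h0]
        rw [if_pos h0]
        simp only [Int.toNat_natCast, hset]
        rw [hcast, ih (j + 1) (c + 1) (by omega) (by omega)]
        have hc : (cs.drop j).countP (· == '0') = (cs.drop (j + 1)).countP (· == '0') + 1 := by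
          rw [hdrop, List.countP_cons]; simp [h0]
        rw [hc]; congr 1; push_cast; ring
      · have hkeep : (cs.map (· == '0')).take j ++ List.replicate (cs.length - j) false
            = (cs.map (· == '0')).take (j + 1) ++ List.replicate (cs.length - (j + 1)) false := by
          rw [hrep, htake]
          simp only [Bool.not_eq_true] at h0
          simp [h0]
        have hc : (cs.drop j).countP (· == '0') = (cs.drop (j + 1)).countP (· == '0') := by
          simp only [Bool.not_eq_true] at h0; rw [hdrop, List.countP_cons]; simp [h0]
        rw [if_neg h0, hkeep, hcast, ih (j + 1) c (by omega) (by omega), hc]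

theorem compFold (cs : List Char) (d : Nat) : ∀ (j : Nat) (acc : List Char), cs.length - j = d → j ≤ cs.length →
    (PySem.List.pyRange (j : Int) (cs.length : Int) 1).foldl (aKeepStep cs (cs.map (· == '0'))) acc
    = acc ++ (cs.drop j).filter (fun c => !(c == '0')) := by
  induction d with
  | zero =>
      intro j acc hd hj
      have hj' : j = cs.length := by omega
      subst hj'
      rw [PySem.List.pyRange_one_eq_nil (le_refl _)]
      simp
  | succ d ih =>
      intro j acc hd hj
      have hlt : j < cs.length := by omega
      rw [PySem.List.pyRange_one_cons (by exact_mod_cast hlt)]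
      have hcast : ((j : Int) + 1) = ((j + 1 : Nat) : Int) := by push_cast; ring
      have hget : PySem.List.pyGetD cs (j : Int) ' ' = cs[j] := by
        simp [List.getD_eq_getElem?_getD, List.getElem?_eq_getElem hlt]
      have hgetm : PySem.List.pyGetD (cs.map (· == '0')) (j : Int) false = (cs[j] == '0') := by
        have hlt' : j < (cs.map (· == '0')).length := by simpa using hlt
        simp [List.getD_eq_getElem?_getD, List.getElem?_eq_getElem hlt']
      have hdrop : cs.drop j = cs[j] :: cs.drop (j + 1) := List.drop_eq_getElem_cons hlt
      simp only [List.foldl_cons, aKeepStep, hget, hgetm]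
      by_cases h0 : (cs[j] == '0') = true
      · simp only [h0, Bool.not_true, Bool.false_eq_true, if_false]
        rw [hcast, ih (j + 1) acc (by omega) (by omega)]
        have hf : (cs.drop j).filter (fun c => !(c == '0')) = (cs.drop (j + 1)).filter (fun c => !(c == '0')) := by
          rw [hdrop, List.filter_cons]; simp [h0]
        rw [hf]
      · simp only [Bool.not_eq_true] at h0
        simp only [h0, Bool.not_false, if_true]
        rw [hcast, ih (j + 1) (acc ++ [cs[j]]) (by omega) (by omega)]
        have hf : (cs.drop j).filter (fun c => !(c == '0')) = cs[j] :: (cs.drop (j + 1)).filter (fun c => !(c == '0')) := by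
          rw [hdrop, List.filter_cons]; simp [h0]
        rw [hf]
        simp

-- ===== VERDICT (by name: the statement is the Claim_ definition above) =====
theorem remove_zero_spec : Claim_equal_remove_zero := by
  intro s _
  unfold Spec_remove_zero remove_zero remove_zero_alt
  set cs := s.toList with hcs
  have hmask := maskFold cs cs.length 0 0 (by omega) (by omega)
  have hcomp := compFold cs cs.length 0 [] (by omega) (by omega)
  simp only [Nat.cast_zero, List.take_zero, List.map_nil, List.nil_append,
    Nat.sub_zero, List.drop_zero] at hmask hcomp
  rw [removeZeroGo_eq]
  simp only [hmask, hcomp]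
  simp
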